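-- pv_equiv track=rewrite | github.com/ErrorOfTheSyntax/Email-Sejder | main.py | split_commands
-- ===== SOURCE A (Python) =====
-- def split_commands(input_str):
--         commands = []
--         current_command = ""
--         words = input_str.split()
--
--         for word in words:
--             if word.startswith('-'):
--                 if current_command:
--                     commands.append(current_command)
--                 current_command = word
--             else:
--                 current_command += " " + word
--
--         if current_command:
--             commands.append(current_command)
--
--         return commands
-- ===== SOURCE B (Python) =====
-- def _render(words):
--     return ''.join(' ' + w for w in words)
--
-- def _segs(words):
--     # each segment starts at a dash word; scan forward to the next dash word
--     out = []
--     i = 0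
--     while i < len(words):
--         j = i + 1
--         while j < len(words) and not words[j].startswith('-'):
--             j += 1
--         out.append(words[i] + _render(words[i + 1:j]))
--         i = j
--     return out
--
-- def split_commands(input_str):
--     words = input_str.split()
--     k = 0
--     while k < len(words) and not words[k].startswith('-'):
--         k += 1
--     lead = _render(words[:k])
--     return ([lead] if lead else []) + _segs(words[k:])
-- ===== Notes on version B (the rewrite author's own statement) =====
-- stated objective: alternative
-- what changed: Replaces A's single-pass growing-string accumulator with a two-phase segmentation: first locate the dash-word boundaries (span/scan), then render each segment (leading chunk, then one per dash word) independently.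
import Mathlib
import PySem

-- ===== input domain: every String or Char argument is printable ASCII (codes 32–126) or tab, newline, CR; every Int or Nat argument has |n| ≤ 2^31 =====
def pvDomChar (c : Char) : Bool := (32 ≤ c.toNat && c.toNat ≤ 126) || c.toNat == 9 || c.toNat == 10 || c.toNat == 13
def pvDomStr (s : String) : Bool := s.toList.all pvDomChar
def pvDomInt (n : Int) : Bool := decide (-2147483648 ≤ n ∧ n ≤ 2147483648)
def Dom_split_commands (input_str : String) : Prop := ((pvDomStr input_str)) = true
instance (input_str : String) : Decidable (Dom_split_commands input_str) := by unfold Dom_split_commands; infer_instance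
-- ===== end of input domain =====

-- B replaces A's single-pass growing-string accumulator with a two-phase segmentation
-- (find dash-word boundaries, then render each segment independently); objective: alternative.


-- ===== PORT A =====
def split_commands (input_str : String) : List String :=
  let words := PySem.Str.split₀ input_str
  let st := words.foldl (fun (st : List String × String) word =>
      if PySem.Str.startswith word "-" then
        ((if st.2 ≠ "" then st.1 ++ [st.2] else st.1), word)
      else
        (st.1, st.2 ++ " " ++ word)) ([], "")
  if st.2 ≠ "" then st.1 ++ [st.2] else st.1

-- ===== PORT B =====
-- not w.startswith('-')
def pvNonDash (w : String) : Bool := !PySem.Str.startswith w "-"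

-- ''.join(' ' + w for w in words)
def pvRender (ws : List String) : String :=
  ws.foldl (fun s w => s ++ " " ++ w) ""

-- each segment starts at a dash word; its body is the run of non-dash words after it
def pvSegs : List String → List String
  | [] => []
  | d :: rest =>
      (d ++ pvRender (rest.takeWhile pvNonDash)) :: pvSegs (rest.dropWhile pvNonDash)
termination_by ws => ws.length
decreasing_by
  exact Nat.lt_succ_of_le (List.length_dropWhile_le _ _)

def split_commands_alt (input_str : String) : List String :=
  let words := PySem.Str.split₀ input_str
  let lead := pvRender (words.takeWhile pvNonDash)
  (if lead ≠ "" then [lead] else []) ++ pvSegs (words.dropWhile pvNonDash)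

-- ===== PRECONDITION & SPEC =====
def Spec_split_commands (input_str : String) (out : List String) : Prop := out = split_commands_alt input_str
instance (input_str : String) (out : List String) : Decidable (Spec_split_commands input_str out) := by unfold Spec_split_commands; infer_instance

-- ===== CLAIM (what is proved, stated in full; the proofs are below) =====
def Claim_equal_split_commands : Prop := ∀ (input_str : String), Dom_split_commands input_str → Spec_split_commands input_str (split_commands input_str)

-- ===== LEMMAS AND PROOFS =====

-- A's fold step and finishing step, named for the proofs
def pvStep (st : List String × String) (word : String) : List String × String :=
  if PySem.Str.startswith word "-" then
    ((if st.2 ≠ "" then st.1 ++ [st.2] else st.1), word)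
  else
    (st.1, st.2 ++ " " ++ word)

def pvFinish (st : List String × String) : List String :=
  if st.2 ≠ "" then st.1 ++ [st.2] else st.1

theorem pvSegs_nil : pvSegs [] = [] := by rw [pvSegs]

theorem pvSegs_cons (d : String) (rest : List String) :
    pvSegs (d :: rest) =
      (d ++ pvRender (rest.takeWhile pvNonDash)) :: pvSegs (rest.dropWhile pvNonDash) := by
  rw [pvSegs]

theorem pvRender_acc (ws : List String) (a : String) :
    ws.foldl (fun s w => s ++ " " ++ w) a = a ++ pvRender ws := by
  induction ws generalizing a with
  | nil => show a = a ++ ""; rw [String.append_empty]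
  | cons w ws ih =>
    show ws.foldl (fun s w => s ++ " " ++ w) (a ++ " " ++ w) =
      a ++ ws.foldl (fun s w => s ++ " " ++ w) ("" ++ " " ++ w)
    rw [ih (a ++ " " ++ w), ih ("" ++ " " ++ w), String.empty_append,
      String.append_assoc, String.append_assoc, String.append_assoc]

theorem pvRender_cons (w : String) (ws : List String) :
    pvRender (w :: ws) = " " ++ w ++ pvRender ws := by
  show List.foldl (fun s w => s ++ " " ++ w) ("" ++ " " ++ w) ws = _
  rw [pvRender_acc, String.empty_append]

theorem pvStartswith_ne_empty (w : String) (h : PySem.Str.startswith w "-" = true) : w ≠ "" := by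
  intro he; subst he
  simp [PySem.Str.startswith, PySem.Chars.startswith] at h

theorem pvAppend_space_ne_empty (a w : String) : a ++ " " ++ w ≠ "" := by
  intro h
  have := congrArg String.toList h
  simp at this

theorem pvDropWhile_head_false {p : String → Bool} {l : List String} {x : String} {xs : List String}
    (h : l.dropWhile p = x :: xs) : p x = false := by
  induction l with
  | nil => simp at h
  | cons y ys ih =>
    rw [List.dropWhile_cons] at h
    by_cases hy : p y
    · exact ih (by simpa [hy] using h)
    · simp [hy] at h; simp [← h.1]; simpa using hy

-- main invariant: once the current command is nonempty, finishing A's fold over ws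
-- yields the current segment extended by the next run, followed by B's segments
theorem pvMain (ws : List String) (cs : List String) (cur : String) (hcur : cur ≠ "") :
    pvFinish (ws.foldl pvStep (cs, cur)) =
      cs ++ (cur ++ pvRender (ws.takeWhile pvNonDash)) :: pvSegs (ws.dropWhile pvNonDash) := by
  induction ws generalizing cs cur with
  | nil =>
    rw [List.foldl_nil, List.takeWhile_nil, List.dropWhile_nil, pvSegs_nil]
    show pvFinish (cs, cur) = cs ++ [cur ++ ""]
    rw [String.append_empty, pvFinish, if_pos hcur]
  | cons w ws ih =>
    rw [List.foldl_cons, List.takeWhile_cons, List.dropWhile_cons]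
    by_cases hw : PySem.Str.startswith w "-" = true
    · have hw' : w ≠ "" := pvStartswith_ne_empty w hw
      have hp : pvNonDash w = false := by unfold pvNonDash; rw [hw]; rfl
      rw [show pvStep (cs, cur) w = (cs ++ [cur], w) by
        rw [pvStep, if_pos hw]; simp [hcur]]
      rw [ih (cs ++ [cur]) w hw', hp]
      show _ = cs ++ (cur ++ "") :: pvSegs (w :: ws)
      rw [String.append_empty, pvSegs_cons, List.append_assoc, List.singleton_append]
    · have hwf : PySem.Str.startswith w "-" = false := by simpa using hw
      have hp : pvNonDash w = true := by unfold pvNonDash; rw [hwf]; rfl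
      rw [show pvStep (cs, cur) w = (cs, cur ++ " " ++ w) by rw [pvStep, if_neg hw]]
      rw [ih cs (cur ++ " " ++ w) (pvAppend_space_ne_empty cur w), hp]
      simp only [if_true, pvRender_cons, String.append_assoc]

theorem pvNondashFold (t : List String) (cs : List String) (cur : String)
    (h : ∀ w ∈ t, PySem.Str.startswith w "-" = false) :
    t.foldl pvStep (cs, cur) = (cs, cur ++ pvRender t) := by
  induction t generalizing cur with
  | nil => show (cs, cur) = (cs, cur ++ ""); rw [String.append_empty]
  | cons w ws ih =>
    have hw := h w (by simp)
    rw [List.foldl_cons, show pvStep (cs, cur) w = (cs, cur ++ " " ++ w) by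
      rw [pvStep, if_neg (by rw [hw]; exact Bool.false_ne_true)]]
    rw [ih (cur ++ " " ++ w) (fun x hx => h x (by simp [hx])), pvRender_cons]
    simp only [String.append_assoc]

-- ===== VERDICT (by name: the statement is the Claim_ definition above) =====
theorem split_commands_spec : Claim_equal_split_commands := by
  intro input_str _
  unfold Spec_split_commands
  simp only [split_commands, split_commands_alt]
  set words := PySem.Str.split₀ input_str with hwords
  have hsplit : words = words.takeWhile pvNonDash ++ words.dropWhile pvNonDash :=
    (List.takeWhile_append_dropWhile).symm
  show pvFinish (words.foldl pvStep ([], "")) = _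
  have ht : ∀ w ∈ words.takeWhile pvNonDash, PySem.Str.startswith w "-" = false := by
    intro w hw
    have := List.mem_takeWhile_imp hw
    simpa [pvNonDash] using this
  conv_lhs => rw [hsplit, List.foldl_append, pvNondashFold _ _ _ ht]
  rw [String.empty_append]
  cases hr : words.dropWhile pvNonDash with
  | nil =>
    rw [pvSegs_nil, List.foldl_nil, List.append_nil]
    rfl
  | cons d r' =>
    have hd : PySem.Str.startswith d "-" = true := by
      have := pvDropWhile_head_false hr
      simpa [pvNonDash] using this
    have hd' : d ≠ "" := pvStartswith_ne_empty d hd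
    rw [List.foldl_cons, show pvStep ([], pvRender (words.takeWhile pvNonDash)) d =
        ((if pvRender (words.takeWhile pvNonDash) ≠ "" then [pvRender (words.takeWhile pvNonDash)] else []), d) by
      rw [pvStep, if_pos hd]; split_ifs <;> rfl]
    rw [pvMain r' _ d hd', pvSegs_cons]
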